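-- pv_equiv track=rewrite | github.com/rindPHI/isla | src/isla/helpers.py | eliminate_suffixes
-- ===== SOURCE A (Python) =====
-- from typing import (
--     Set,
--     Generator,
--     Tuple,
--     List,
--     Dict,
--     Union,
--     TypeVar,
--     Sequence,
--     cast,
--     Callable,
--     Iterable,
--     Any,
--     Optional,
--     AbstractSet,
--     Iterator,
-- )
--
-- Seq = TypeVar("Seq", bound=Sequence)
--
-- def eliminate_suffixes(a_list: Sequence[Seq]) -> List[Seq]:
--     return [
--         seq
--         for idx_1, seq in enumerate(a_list)
--         if not any(
--             idx_1 != idx_2 and len(pref) < len(seq) and pref == seq[: len(pref)]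
--             for idx_2, pref in enumerate(a_list)
--         )
--     ]
-- ===== SOURCE B (Python) =====
-- def eliminate_suffixes(a_list):
--     pool = set(a_list)
--     return [
--         seq
--         for seq in a_list
--         if not any(seq[:k] in pool for k in range(len(seq)))
--     ]
-- ===== Notes on version B (the rewrite author's own statement) =====
-- stated objective: faster
-- what changed: Replaced the all-pairs scan (for each element, compare against every other element via enumerate) with a single hash set of all elements plus, per element, a membership test of each of its own proper prefixes.
import Mathlib
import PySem

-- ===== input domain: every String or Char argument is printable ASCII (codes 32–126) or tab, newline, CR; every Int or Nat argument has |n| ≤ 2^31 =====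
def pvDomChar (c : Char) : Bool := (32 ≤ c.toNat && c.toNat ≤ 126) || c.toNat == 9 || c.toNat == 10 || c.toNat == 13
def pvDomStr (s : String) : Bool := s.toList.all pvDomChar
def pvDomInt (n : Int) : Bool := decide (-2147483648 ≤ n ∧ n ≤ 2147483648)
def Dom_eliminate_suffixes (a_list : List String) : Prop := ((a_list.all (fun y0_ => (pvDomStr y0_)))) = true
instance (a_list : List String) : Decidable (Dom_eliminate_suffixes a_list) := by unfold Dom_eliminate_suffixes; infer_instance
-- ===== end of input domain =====

-- B replaces A's quadratic all-pairs prefix scan by one hash set of all elements plus,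
-- per element, a scan over its own proper prefixes (objective: faster).

-- ===== PORT A =====
-- [seq for idx_1, seq in enumerate(a_list)
--      if not any(idx_1 != idx_2 and len(pref) < len(seq) and pref == seq[:len(pref)]
--                 for idx_2, pref in enumerate(a_list))]
def eliminate_suffixes (a_list : List String) : List String :=
  ((PySem.List.enumerate a_list).filter (fun p =>
    !((PySem.List.enumerate a_list).any (fun q =>
        decide (p.1 ≠ q.1) &&
        decide (PySem.Str.len q.2 < PySem.Str.len p.2) &&
        (q.2 == PySem.Str.slice p.2 none (some (PySem.Str.len q.2))))))).map (·.2)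

-- ===== PORT B =====
-- pool = set(a_list)
-- [seq for seq in a_list if not any(seq[:k] in pool for k in range(len(seq)))]
def eliminate_suffixes_alt (a_list : List String) : List String :=
  let pool : PySem.Set String := PySem.Set.ofList a_list
  a_list.filter (fun seq =>
    !((PySem.List.pyRange 0 (PySem.Str.len seq)).any (fun k =>
        PySem.Set.contains pool (PySem.Str.slice seq none (some k)))))

-- ===== PRECONDITION & SPEC =====
def Spec_eliminate_suffixes (a_list : List String) (out : List String) : Prop := out = eliminate_suffixes_alt a_list
instance (a_list : List String) (out : List String) : Decidable (Spec_eliminate_suffixes a_list out) := by unfold Spec_eliminate_suffixes; infer_instance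

-- ===== CLAIM (what is proved, stated in full; the proofs are below) =====
def Claim_equal_eliminate_suffixes : Prop := ∀ (a_list : List String), Dom_eliminate_suffixes a_list → Spec_eliminate_suffixes a_list (eliminate_suffixes a_list)

-- ===== LEMMAS AND PROOFS =====

-- Filtering enumerate by a predicate on the value, then projecting the value, is filtering the list.
theorem pv_filter_enumerate_map {α : Type} (xs : List α) (s0 : Int) (f : α → Bool) :
    (((PySem.List.enumerate xs s0).filter (fun p => f p.2)).map (·.2)) = xs.filter f := by
  induction xs generalizing s0 with
  | nil => rfl
  | cons x xs ih =>
    rw [PySem.List.enumerate_cons]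
    by_cases h : f x <;> simp [h, ih]

-- s[:k] as a take on the character list (0 ≤ k).
theorem pv_slice_toList (s : String) (k : Int) (hk : 0 ≤ k) :
    (PySem.Str.slice s none (some k)).toList = s.toList.take k.toNat := by
  rw [PySem.Str.toList_slice, PySem.Chars.slice_eq_listSlice, PySem.List.slice_to _ hk]

-- The two elimination tests agree on every (index, value) pair of enumerate a_list.
theorem pv_point (xs : List String) (i : Int) (s : String)
    (h : (i, s) ∈ PySem.List.enumerate xs 0) :
    ((PySem.List.enumerate xs).any (fun q =>
        decide (i ≠ q.1) &&
        decide (PySem.Str.len q.2 < PySem.Str.len s) &&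
        (q.2 == PySem.Str.slice s none (some (PySem.Str.len q.2))))) =
    ((PySem.List.pyRange 0 (PySem.Str.len s)).any (fun k =>
        PySem.Set.contains (PySem.Set.ofList xs) (PySem.Str.slice s none (some k)))) := by
  rw [PySem.List.mem_enumerate_iff] at h
  obtain ⟨ki, hki, hpi⟩ := h
  have hi : i = (ki : Int) := by simpa using congrArg Prod.fst hpi
  have hsi : xs[ki] = s := by simpa using (congrArg Prod.snd hpi).symm
  apply Bool.eq_iff_iff.mpr
  simp only [List.any_eq_true, Bool.and_eq_true, decide_eq_true_eq, beq_iff_eq,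
    PySem.List.mem_enumerate_iff, PySem.Set.contains_iff, PySem.Set.mem_ofList,
    PySem.List.mem_pyRange_one, PySem.Str.len_eq]
  constructor
  · rintro ⟨q, ⟨kj, hkj, hq⟩, ⟨hne, hlt⟩, heq⟩
    have hq2 : q.2 = xs[kj] := by simpa using congrArg Prod.snd hq
    refine ⟨(q.2.toList.length : Int), ⟨by positivity, by exact_mod_cast hlt⟩, ?_⟩
    rw [← heq, hq2]
    exact List.getElem_mem hkj
  · rintro ⟨k, ⟨hk0, hklt⟩, hmem⟩
    obtain ⟨kj, hkj, hj⟩ := List.getElem_of_mem hmem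
    have hlen : (PySem.Str.slice s none (some k)).toList.length = k.toNat := by
      rw [pv_slice_toList _ _ hk0, List.length_take]
      omega
    refine ⟨((kj : Int), xs[kj]), ⟨kj, hkj, by simp⟩, ⟨?_, ?_⟩, ?_⟩
    · -- i ≠ kj: the slice is strictly shorter than s, so it cannot be s itself
      intro hik
      have hkij : ki = kj := by simp only [hi] at hik; exact_mod_cast hik
      subst hkij
      have := congrArg (fun t => t.toList.length) (hsi.symm.trans hj)
      simp only [hlen] at this
      omega
    · simp only [hj, hlen]; omega
    · simp only [hj, hlen]
      apply String.toList_inj.mp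
      rw [pv_slice_toList _ _ hk0, pv_slice_toList _ _ (by positivity)]
      simp
      omega

-- ===== VERDICT (by name: the statement is the Claim_ definition above) =====
theorem eliminate_suffixes_spec : Claim_equal_eliminate_suffixes := by
  intro a_list _
  unfold Spec_eliminate_suffixes eliminate_suffixes eliminate_suffixes_alt
  rw [List.filter_congr (fun p hp => ?_), pv_filter_enumerate_map]
  obtain ⟨i, s⟩ := p
  rw [pv_point a_list i s hp]
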